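-- pv_equiv track=rewrite | github.com/ramvalicharla/financeops | backend/financeops/modules/accounting_layer/tests/test_gst_tds_engine.py | _checksum_char
-- ===== SOURCE A (Python) =====
-- _BASE36 = "0123456789ABCDEFGHIJKLMNOPQRSTUVWXYZ"
--
-- _BASE36_MAP = {char: idx for idx, char in enumerate(_BASE36)}
--
-- def _checksum_char(body: str) -> str:
--     total = 0
--     for idx, char in enumerate(body):
--         value = _BASE36_MAP[char]
--         factor = 1 if idx % 2 == 0 else 2
--         product = value * factor
--         total += (product // 36) + (product % 36)
--     return _BASE36[(36 - (total % 36)) % 36]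
-- ===== SOURCE B (Python) =====
-- _BASE36 = "0123456789ABCDEFGHIJKLMNOPQRSTUVWXYZ"
--
-- _BASE36_MAP = {char: idx for idx, char in enumerate(_BASE36)}
--
-- # Precomputed digit-sum of the doubled value, for odd positions; an even
-- # position contributes its value directly (the digit-sum of v < 36 is v).
-- _ODD_CONTRIB = [2 * v // 36 + 2 * v % 36 for v in range(36)]
--
--
-- def _checksum_char(body: str) -> str:
--     # Staged: map to values once, split by index parity with slices,
--     # sum evens directly and odds through the precomputed table.
--     values = list(map(_BASE36_MAP.__getitem__, body))
--     total = sum(values[::2]) + sum(map(_ODD_CONTRIB.__getitem__, values[1::2]))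
--     return _BASE36[-total % 36]
-- ===== Notes on version B (the rewrite author's own statement) =====
-- stated objective: faster
-- what changed: Replaces the single enumerate loop with its per-index parity branch and per-character division by staged passes: map all characters to values once, split by index parity with slices, sum even positions directly (digit-sum of v<36 is v) and odd positions through a precomputed doubled-digit-sum table.
import Mathlib
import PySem

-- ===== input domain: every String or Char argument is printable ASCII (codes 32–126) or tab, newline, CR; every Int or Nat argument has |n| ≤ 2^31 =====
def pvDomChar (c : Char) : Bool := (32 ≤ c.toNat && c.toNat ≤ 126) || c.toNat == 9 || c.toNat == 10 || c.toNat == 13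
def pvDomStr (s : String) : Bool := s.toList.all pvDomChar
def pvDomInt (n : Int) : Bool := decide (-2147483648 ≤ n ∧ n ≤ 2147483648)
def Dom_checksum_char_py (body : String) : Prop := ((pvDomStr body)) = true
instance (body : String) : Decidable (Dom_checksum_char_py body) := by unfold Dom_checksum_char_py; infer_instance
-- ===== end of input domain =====

-- B replaces A's single parity-branching per-character loop by staged passes: map to values
-- once, split by index parity with slices, and sum via a precomputed odd-contribution table.


-- ===== PORT A =====
-- _BASE36 (shared module-level constant of both Pythons)
def pvBase36 : List Char := "0123456789ABCDEFGHIJKLMNOPQRSTUVWXYZ".toList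

-- _BASE36_MAP = {char: idx for idx, char in enumerate(_BASE36)}  (A's module-level dict)
def pvBase36Map : PySem.Dict Char Int :=
  (PySem.List.enumerate pvBase36).foldl (fun d p => d.insert p.2 p.1) PySem.Dict.empty

-- _BASE36_MAP[c]; lookup raises KeyError outside Pre_, so the default branch is never taken on admitted inputs
def pvMapGet (c : Char) : Int := (PySem.Dict.get? pvBase36Map c).getD 0

def checksum_char_py (body : String) : String :=
  let total : Int := (PySem.List.enumerate body.toList).foldl
    (fun total p =>
      let value := pvMapGet p.2
      let factor : Int := if PySem.Int.mod p.1 2 = 0 then 1 else 2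
      let product := value * factor
      total + (PySem.Int.floordiv product 36 + PySem.Int.mod product 36)) 0
  ((pvBase36[(PySem.Int.mod (36 - PySem.Int.mod total 36) 36).toNat]?).map
    (fun c => String.ofList [c])).getD ""

-- ===== PORT B =====
-- _ODD_CONTRIB = [2 * v // 36 + 2 * v % 36 for v in range(36)]  (Source B's precomputed table)
def pvOddContrib : List Int :=
  (PySem.List.pyRange 0 36 1).map
    (fun v => PySem.Int.floordiv (2 * v) 36 + PySem.Int.mod (2 * v) 36)

def checksum_char_py_alt (body : String) : String :=
  -- list(map(_BASE36_MAP.__getitem__, body)): raises KeyError outside Pre_ (pvMapGet's default)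
  let values : List Int := body.toList.map pvMapGet
  -- sum(values[::2]) + sum(map(_ODD_CONTRIB.__getitem__, values[1::2]))
  let total : Int :=
    ((PySem.List.slice? values none none 2).getD []).sum
      + (((PySem.List.slice? values (some 1) none 2).getD []).map
          (fun v => PySem.List.pyGetD pvOddContrib v 0)).sum
  ((pvBase36[(PySem.Int.mod (-total) 36).toNat]?).map
    (fun c => String.ofList [c])).getD ""

-- ===== PRECONDITION & SPEC =====
-- Pre_ excludes exactly the inputs containing a character outside 0-9A-Z, on which A's dict lookup raises KeyError.
def Pre_checksum_char_py (body : String) : Prop :=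
  body.toList.all (fun c => pvBase36.contains c) = true
instance (body : String) : Decidable (Pre_checksum_char_py body) := by
  unfold Pre_checksum_char_py; infer_instance

def pvWitness_checksum_char_py : String := "7A3Z"

def Spec_checksum_char_py (body : String) (out : String) : Prop := out = checksum_char_py_alt body
instance (body : String) (out : String) : Decidable (Spec_checksum_char_py body out) := by
  unfold Spec_checksum_char_py; infer_instance

-- ===== CLAIM (what is proved, stated in full; the proofs are below) =====
def Claim_equal_checksum_char_py : Prop :=
  ∀ (body : String), Dom_checksum_char_py body → Pre_checksum_char_py body →
    Spec_checksum_char_py body (checksum_char_py body)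

-- ===== LEMMAS AND PROOFS =====

-- the even-index sublist xs[::2]
def pvEvens {α : Type} : List α → List α
  | [] => []
  | [a] => [a]
  | a :: _ :: t => a :: pvEvens t

-- A's loop body as a named function (for stating the invariant)
def pvAStep (total : Int) (p : Int × Char) : Int :=
  let value := pvMapGet p.2
  let factor : Int := if PySem.Int.mod p.1 2 = 0 then 1 else 2
  let product := value * factor
  total + (PySem.Int.floordiv product 36 + PySem.Int.mod product 36)

set_option maxRecDepth 100000 in
lemma pvMapGet_vals : pvBase36.map pvMapGet =
    [0,1,2,3,4,5,6,7,8,9,10,11,12,13,14,15,16,17,18,19,20,21,22,23,24,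
     25,26,27,28,29,30,31,32,33,34,35] := by decide

lemma pvMapGet_bounds : ∀ c ∈ pvBase36, 0 ≤ pvMapGet c ∧ pvMapGet c < 36 := by
  intro c hc
  have h : pvMapGet c ∈ pvBase36.map pvMapGet := List.mem_map_of_mem hc
  rw [pvMapGet_vals] at h
  simp only [List.mem_cons, List.not_mem_nil, or_false] at h
  omega

-- Source B's table, read at a value known to be in range
lemma pvOddContrib_get (v : Int) (h0 : 0 ≤ v) (h1 : v < 36) :
    PySem.List.pyGetD pvOddContrib v 0
      = PySem.Int.floordiv (2 * v) 36 + PySem.Int.mod (2 * v) 36 := by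
  unfold pvOddContrib
  exact PySem.List.pyGetD_map_pyRange_of_nonneg _ 36 v 0 h0 h1

lemma pvDigitSum_small (v : Int) (h0 : 0 ≤ v) (h1 : v < 36) :
    PySem.Int.floordiv v 36 + PySem.Int.mod v 36 = v := by
  rw [PySem.Int.floordiv_eq_ediv_of_pos (by omega), PySem.Int.mod_eq_emod_of_pos (by omega)]
  omega

lemma pvMod_even (s : Nat) : PySem.Int.mod (2 * (s : Int)) 2 = 0 := by
  rw [PySem.Int.mod_eq_emod_of_pos (by omega)]; omega

lemma pvMod_odd (s : Nat) : PySem.Int.mod (2 * (s : Int) + 1) 2 = 1 := by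
  rw [PySem.Int.mod_eq_emod_of_pos (by omega)]; omega

-- invariant: A's fold over an evenly-started enumeration splits into the parity sums of B
lemma pvFold_split : ∀ (l : List Char), (∀ c ∈ l, c ∈ pvBase36) →
    ∀ (s : Nat) (t : Int),
      (PySem.List.enumerate l (2 * (s : Int))).foldl pvAStep t =
        t + ((pvEvens l).map pvMapGet).sum
          + ((pvEvens l.tail).map
              (fun c => PySem.List.pyGetD pvOddContrib (pvMapGet c) 0)).sum
  | [], _, _, t => by simp [PySem.List.enumerate_nil, pvEvens]
  | [a], h, s, t => by
      have ha := pvMapGet_bounds a (h a (by simp))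
      simp only [PySem.List.enumerate_cons, PySem.List.enumerate_nil, List.foldl_cons,
        List.foldl_nil, pvEvens, List.tail, List.map, List.sum_cons, List.sum_nil,
        pvAStep, pvMod_even s, reduceIte, mul_one]
      rw [pvDigitSum_small _ ha.1 ha.2]; ring
  | a :: b :: rest, h, s, t => by
      have ha := pvMapGet_bounds a (h a (by simp))
      have hb := pvMapGet_bounds b (h b (by simp))
      have hrest : ∀ c ∈ rest, c ∈ pvBase36 := fun c hc => h c (by simp [hc])
      have hnext : (2 : Int) * (s : Int) + 1 + 1 = 2 * ((s + 1 : Nat) : Int) := by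
        push_cast; ring
      simp only [PySem.List.enumerate_cons, List.foldl_cons]
      rw [hnext, pvFold_split rest hrest (s + 1)]
      have htl : (a :: b :: rest).tail = b :: rest := rfl
      rw [htl]
      rcases rest with _ | ⟨c, rest'⟩
      · simp only [pvEvens, List.tail, List.map, List.sum_cons, List.sum_nil,
          pvAStep, pvMod_even s, pvMod_odd s, reduceIte, mul_one]
        rw [if_neg (show ¬(1:Int) = 0 by norm_num), mul_comm (pvMapGet b) 2,
          pvDigitSum_small _ ha.1 ha.2, pvOddContrib_get _ hb.1 hb.2]
        ring
      · simp only [pvEvens, List.tail, List.map, List.sum_cons,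
          pvAStep, pvMod_even s, pvMod_odd s, reduceIte, mul_one]
        rw [if_neg (show ¬(1:Int) = 0 by norm_num), mul_comm (pvMapGet b) 2,
          pvDigitSum_small _ ha.1 ha.2, pvOddContrib_get _ hb.1 hb.2]
        ring

-- xs[2k]? collected over the first half of the indices is exactly pvEvens xs
lemma pvFilterMap_get2 {α : Type} : ∀ (xs : List α),
    List.filterMap (fun k : Nat => xs[2 * k]?) (List.range ((xs.length + 1) / 2)) = pvEvens xs
  | [] => by simp [pvEvens]
  | [a] => by simp [pvEvens]
  | a :: b :: t => by
      have hlen : ((a :: b :: t).length + 1) / 2 = (t.length + 1) / 2 + 1 := by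
        simp [List.length_cons]; omega
      rw [hlen, List.range_succ_eq_map, List.filterMap_cons, List.filterMap_map]
      have h0 : (a :: b :: t)[2 * 0]? = some a := rfl
      rw [h0]
      have hf : (fun k : Nat => (a :: b :: t)[2 * (k + 1)]?) = (fun k : Nat => t[2 * k]?) := by
        funext k
        have : 2 * (k + 1) = 2 * k + 2 := by omega
        rw [this]
        rfl
      show a :: List.filterMap ((fun k : Nat => (a :: b :: t)[2 * k]?) ∘ Nat.succ)
          (List.range ((t.length + 1) / 2)) = pvEvens (a :: b :: t)
      have hcomp : ((fun k : Nat => (a :: b :: t)[2 * k]?) ∘ Nat.succ)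
          = (fun k : Nat => t[2 * k]?) := by
        funext k
        show (a :: b :: t)[2 * (k + 1)]? = t[2 * k]?
        have : 2 * (k + 1) = 2 * k + 2 := by omega
        rw [this]; rfl
      rw [hcomp, pvFilterMap_get2 t]
      rfl

-- xs[::2] is pvEvens xs
lemma pvSlice2_evens {α : Type} (xs : List α) :
    PySem.List.slice? xs none none 2 = some (pvEvens xs) := by
  rw [PySem.List.slice?]
  simp only [PySem.List.sliceIndices, show ¬((2:Int) < 0) by norm_num,
    show ((2:Int) = 0) = False by simp, reduceIte]
  congr 1
  have hcnt : (if (0:Int) < 2 then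
      if (0:Int) < (xs.length:Int) then (((xs.length:Int) - 0 + 2 - 1) / 2).toNat else 0
      else if (xs.length:Int) < 0 then ((0 - (xs.length:Int) + -2 - 1) / -2).toNat else 0)
      = (xs.length + 1) / 2 := by
    rcases Nat.eq_zero_or_pos xs.length with h | h
    · simp [h]
    · rw [if_pos (by norm_num), if_pos (by exact_mod_cast h)]
      omega
  rw [hcnt, ← pvFilterMap_get2 xs]
  apply List.filterMap_congr
  intro k _
  congr 1
  omega

-- xs[1::2] is pvEvens xs.tail
lemma pvSlice2_odds {α : Type} (xs : List α) :
    PySem.List.slice? xs (some 1) none 2 = some (pvEvens xs.tail) := by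
  rcases xs with _ | ⟨a, t⟩
  · rfl
  · rw [PySem.List.slice?]
    simp only [PySem.List.sliceIndices, show ¬((2:Int) < 0) by norm_num,
      show ((2:Int) = 0) = False by simp, reduceIte,
      show ¬((1:Int) < 0) by norm_num, List.tail_cons]
    congr 1
    have hmin : min (1:Int) ((a :: t).length : Int) = 1 := by
      simp [List.length_cons]
    rw [hmin]
    have hcnt : (if (1:Int) < ((a :: t).length:Int) then ((((a :: t).length:Int) - 1 + 2 - 1) / 2).toNat else 0)
        = (t.length + 1) / 2 := by
      rcases Nat.eq_zero_or_pos t.length with h | h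
      · rw [if_neg (by simp [List.length_cons, h])]
        omega
      · rw [if_pos (by simp [List.length_cons]; omega)]
        simp [List.length_cons]
        omega
    rw [hcnt, ← pvFilterMap_get2 t]
    apply List.filterMap_congr
    intro k _
    have h1 : ((1:Int) + 2 * (k:Int)).toNat = 2 * k + 1 := by omega
    rw [h1]
    show (a :: t)[2 * k + 1]? = t[2 * k]?
    rfl

lemma pvEvens_map {α β : Type} (f : α → β) : ∀ (l : List α),
    pvEvens (l.map f) = (pvEvens l).map f
  | [] => rfl
  | [a] => rfl
  | a :: b :: t => by
      show f a :: pvEvens ((t.map f)) = (a :: pvEvens t).map f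
      rw [pvEvens_map f t]
      rfl

-- (36 - t % 36) % 36 and (-t) % 36 agree (both Python mods, divisor 36)
lemma pvIdx_eq (t : Int) :
    PySem.Int.mod (36 - PySem.Int.mod t 36) 36 = PySem.Int.mod (-t) 36 := by
  rw [PySem.Int.mod_eq_emod_of_pos (by norm_num), PySem.Int.mod_eq_emod_of_pos (by norm_num),
    PySem.Int.mod_eq_emod_of_pos (by norm_num)]
  omega

-- ===== VERDICT (by name: the statements are the Claim_ definitions above) =====
theorem checksum_char_py_spec : Claim_equal_checksum_char_py := by
  intro body _ hpre
  have hpre' : ∀ c ∈ body.toList, c ∈ pvBase36 := by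
    simpa [Pre_checksum_char_py, List.all_eq_true] using hpre
  show _ = _
  simp only [checksum_char_py, checksum_char_py_alt]
  have hA := pvFold_split body.toList hpre' 0 0
  simp only [Nat.cast_zero, mul_zero] at hA
  rw [show (PySem.List.enumerate body.toList).foldl
      (fun total p =>
        let value := pvMapGet p.2
        let factor : Int := if PySem.Int.mod p.1 2 = 0 then 1 else 2
        let product := value * factor
        total + (PySem.Int.floordiv product 36 + PySem.Int.mod product 36)) 0
      = (PySem.List.enumerate body.toList).foldl pvAStep 0 from rfl, hA]
  rw [pvSlice2_evens, pvSlice2_odds]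
  simp only [Option.getD_some]
  have htail : (body.toList.map pvMapGet).tail = body.toList.tail.map pvMapGet := by
    rcases body.toList with _ | ⟨a, t⟩ <;> rfl
  rw [htail, pvEvens_map, pvEvens_map, List.map_map]
  simp only [Function.comp_def]
  rw [pvIdx_eq, zero_add]
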